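-- pv_equiv track=rewrite | github.com/ds5105119/algorithm | 11386_2.py | calculate_BL_A_L
-- ===== SOURCE A (Python) =====
-- MOD = 10 ** 9 + 7
--
-- def count_periodic_strings(L, periodic_counts):
--     if periodic_counts[L] != -1:
--         return periodic_counts[L]
--     if L == 1:
--         periodic_counts[L] = 0  # Single character strings are not periodic
--         return 0
--     count = 0
--     for i in range(1, L):
--         if L % i == 0:
--             count += pow(2, i, MOD)
--             count %= MOD
--     periodic_counts[L] = count
--     return count
--
-- def calculate_BL_A_L(max_L, catalan):
--     BL = [0] * (max_L + 1)
--     AL = [0] * ((max_L // 2) + 1)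
--     periodic_counts = [-1] * (max_L + 1)
--
--     for L in range(1, max_L + 1):
--         if L % 2 == 1:
--             BL[L] = pow(2, L, MOD)
--         else:
--             valid_count = catalan[L // 2]
--             periodic_string_count = count_periodic_strings(L, periodic_counts)
--             BL[L] = (pow(2, L, MOD) - valid_count + MOD) % MOD
--
--     for L in range(1, (max_L // 2) + 1):
--         sum_ = 0
--         for i in range(1, L + 1):
--             if i % 2 == 0:
--                 sum_ = (sum_ + catalan[L - (i // 2)] - AL[i // 2] + MOD) % MOD
--         AL[L] = (catalan[L] - sum_ + MOD) % MOD
--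
--     return BL, AL
-- ===== SOURCE B (Python) =====
-- MOD = 10 ** 9 + 7
--
-- def calculate_BL_A_L(max_L, catalan):
--     half = max_L // 2
--     BL = [0] * (max_L + 1)
--     p = 1
--     for L in range(1, max_L + 1):
--         p = p * 2 % MOD
--         if L % 2 == 1:
--             BL[L] = p
--         else:
--             BL[L] = (p - catalan[L // 2] + MOD) % MOD
--
--     # prefix sums of catalan[1..half]
--     C = [0] * (half + 1)
--     for j in range(1, half + 1):
--         C[j] = C[j - 1] + catalan[j]
--
--     AL = [0] * (half + 1)
--     Ap = [0] * (half + 1)  # prefix sums of AL[1..L]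
--     for L in range(1, half + 1):
--         k = L // 2
--         s = (C[L - 1] - C[L - 1 - k] - Ap[k]) % MOD
--         AL[L] = (catalan[L] - s + MOD) % MOD
--         Ap[L] = Ap[L - 1] + AL[L]
--     return BL, AL
-- ===== Notes on version B (the rewrite author's own statement) =====
-- stated objective: faster
-- what changed: Replaced A's quadratic inner summation for AL (and its dead per-L divisor scan for periodic counts) with prefix-sum arrays over catalan and AL plus a running power of two, computing each AL[L] in O(1).
import Mathlib
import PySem

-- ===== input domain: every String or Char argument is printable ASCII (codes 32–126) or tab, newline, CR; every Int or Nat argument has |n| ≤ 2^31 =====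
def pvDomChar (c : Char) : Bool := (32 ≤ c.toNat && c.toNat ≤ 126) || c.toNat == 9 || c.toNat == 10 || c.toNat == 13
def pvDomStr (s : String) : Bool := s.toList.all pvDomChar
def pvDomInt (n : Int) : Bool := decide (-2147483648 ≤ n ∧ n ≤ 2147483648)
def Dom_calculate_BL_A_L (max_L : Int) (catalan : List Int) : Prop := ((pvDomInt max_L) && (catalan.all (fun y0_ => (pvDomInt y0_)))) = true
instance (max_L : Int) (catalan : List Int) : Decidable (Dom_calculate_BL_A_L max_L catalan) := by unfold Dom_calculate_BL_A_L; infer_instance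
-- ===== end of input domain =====

-- B replaces A's quadratic inner summation for AL (and A's dead per-L divisor scan for
-- periodic string counts) by prefix-sum arrays over catalan and AL plus a running power
-- of two, computing each entry in O(1): objective = faster (asymptotic).

-- ===== PORT A =====
def pvMOD : Int := 1000000007

-- count_periodic_strings(L, periodic_counts): returns (value, updated memo list).
-- pow(2, i, MOD) is PySem.Int.powMod 2 i.toNat pvMOD — exact: i ≥ 1 at every call site.
-- periodic_counts[L] / [L] = … : L is 2 ≤ L < len at every call site, so pyGetD/pySetD are exact.
def count_periodic_strings (L : Int) (pc : List Int) : Int × List Int :=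
  if PySem.List.pyGetD pc L 0 ≠ -1 then (PySem.List.pyGetD pc L 0, pc)
  else if L = 1 then (0, PySem.List.pySetD pc L 0)
  else
    let count := (PySem.List.pyRange 1 L 1).foldl
      (fun c i => if PySem.Int.mod L i = 0
        then PySem.Int.mod (c + PySem.Int.powMod 2 i.toNat pvMOD) pvMOD else c) 0
    (count, PySem.List.pySetD pc L count)

-- one iteration of A's first loop; state = (BL, periodic_counts)
def pvAstepBL (catalan : List Int) (st : List Int × List Int) (L : Int) : List Int × List Int :=
  if PySem.Int.mod L 2 = 1 then
    (PySem.List.pySetD st.1 L (PySem.Int.powMod 2 L.toNat pvMOD), st.2)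
  else
    let valid_count := PySem.List.pyGetD catalan (PySem.Int.floordiv L 2) 0
    let r := count_periodic_strings L st.2
    (PySem.List.pySetD st.1 L
      (PySem.Int.mod (PySem.Int.powMod 2 L.toNat pvMOD - valid_count + pvMOD) pvMOD), r.2)

-- A's inner  for i in range(1, L+1): if i % 2 == 0: sum_ = (sum_ + catalan[L-i//2] - AL[i//2] + MOD) % MOD
def pvAinner (catalan AL : List Int) (L : Int) : Int :=
  (PySem.List.pyRange 1 (L + 1) 1).foldl
    (fun s i => if PySem.Int.mod i 2 = 0 then
        PySem.Int.mod (s + PySem.List.pyGetD catalan (L - PySem.Int.floordiv i 2) 0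
          - PySem.List.pyGetD AL (PySem.Int.floordiv i 2) 0 + pvMOD) pvMOD
      else s) 0

-- one iteration of A's second loop
def pvAstepAL (catalan : List Int) (AL : List Int) (L : Int) : List Int :=
  PySem.List.pySetD AL L
    (PySem.Int.mod (PySem.List.pyGetD catalan L 0 - pvAinner catalan AL L + pvMOD) pvMOD)

def calculate_BL_A_L (max_L : Int) (catalan : List Int) : List Int × List Int :=
  let BL0 : List Int := List.replicate (max_L + 1).toNat 0
  let AL0 : List Int := List.replicate (PySem.Int.floordiv max_L 2 + 1).toNat 0
  let pc0 : List Int := List.replicate (max_L + 1).toNat (-1)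
  let st := (PySem.List.pyRange 1 (max_L + 1) 1).foldl (pvAstepBL catalan) (BL0, pc0)
  let AL := (PySem.List.pyRange 1 (PySem.Int.floordiv max_L 2 + 1) 1).foldl (pvAstepAL catalan) AL0
  (st.1, AL)

-- ===== PORT B =====
-- one iteration of B's first loop; state = (BL, p) with p the running power of two
def pvBstepBL (catalan : List Int) (st : List Int × Int) (L : Int) : List Int × Int :=
  let p := PySem.Int.mod (st.2 * 2) pvMOD
  if PySem.Int.mod L 2 = 1 then (PySem.List.pySetD st.1 L p, p)
  else
    (PySem.List.pySetD st.1 L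
      (PySem.Int.mod (p - PySem.List.pyGetD catalan (PySem.Int.floordiv L 2) 0 + pvMOD) pvMOD), p)

-- one iteration of B's prefix-sum build  C[j] = C[j-1] + catalan[j]
def pvBstepC (catalan : List Int) (C : List Int) (j : Int) : List Int :=
  PySem.List.pySetD C j (PySem.List.pyGetD C (j - 1) 0 + PySem.List.pyGetD catalan j 0)

-- one iteration of B's AL loop; state = (AL, Ap) with Ap the prefix sums of AL
def pvBstepAL (catalan C : List Int) (st : List Int × List Int) (L : Int) : List Int × List Int :=
  let k := PySem.Int.floordiv L 2
  let s := PySem.Int.mod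
      (PySem.List.pyGetD C (L - 1) 0 - PySem.List.pyGetD C (L - 1 - k) 0
        - PySem.List.pyGetD st.2 k 0) pvMOD
  let a := PySem.Int.mod (PySem.List.pyGetD catalan L 0 - s + pvMOD) pvMOD
  (PySem.List.pySetD st.1 L a,
   PySem.List.pySetD st.2 L (PySem.List.pyGetD st.2 (L - 1) 0 + a))

def calculate_BL_A_L_alt (max_L : Int) (catalan : List Int) : List Int × List Int :=
  let half := PySem.Int.floordiv max_L 2
  let BL := ((PySem.List.pyRange 1 (max_L + 1) 1).foldl (pvBstepBL catalan)
      (List.replicate (max_L + 1).toNat 0, 1)).1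
  let C := (PySem.List.pyRange 1 (half + 1) 1).foldl (pvBstepC catalan)
      (List.replicate (half + 1).toNat 0)
  let ALAp := (PySem.List.pyRange 1 (half + 1) 1).foldl (pvBstepAL catalan C)
      (List.replicate (half + 1).toNat 0, List.replicate (half + 1).toNat 0)
  (BL, ALAp.1)

-- ===== PRECONDITION & SPEC =====
-- Pre_ excludes exactly the inputs where Python A raises IndexError:
-- max_L ≥ 2 with len(catalan) ≤ max_L // 2 (catalan[L//2] / catalan[L] out of range).
def Pre_calculate_BL_A_L (max_L : Int) (catalan : List Int) : Prop :=
  max_L < 2 ∨ PySem.Int.floordiv max_L 2 < (catalan.length : Int)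
instance (max_L : Int) (catalan : List Int) : Decidable (Pre_calculate_BL_A_L max_L catalan) := by
  unfold Pre_calculate_BL_A_L; infer_instance

def pvWitness_calculate_BL_A_L : Int × List Int := (6, [1, 1, 2, 5])

def Spec_calculate_BL_A_L (max_L : Int) (catalan : List Int) (out : List Int × List Int) : Prop :=
  out = calculate_BL_A_L_alt max_L catalan
instance (max_L : Int) (catalan : List Int) (out : List Int × List Int) :
    Decidable (Spec_calculate_BL_A_L max_L catalan out) := by
  unfold Spec_calculate_BL_A_L; infer_instance

-- ===== CLAIM (what is proved, stated in full; the proofs are below) =====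
def Claim_equal_calculate_BL_A_L : Prop :=
  ∀ (max_L : Int) (catalan : List Int), Dom_calculate_BL_A_L max_L catalan →
    Pre_calculate_BL_A_L max_L catalan →
    Spec_calculate_BL_A_L max_L catalan (calculate_BL_A_L max_L catalan)

-- ===== LEMMAS AND PROOFS =====

theorem pvMOD_pos : (0 : Int) < pvMOD := by norm_num [pvMOD]

theorem pow2_step (m : Nat) :
    PySem.Int.mod (PySem.Int.powMod 2 m pvMOD * 2) pvMOD = PySem.Int.powMod 2 (m + 1) pvMOD := by
  simp only [PySem.Int.powMod, PySem.Int.mod_eq_emod_of_pos pvMOD_pos]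
  rw [pow_succ, Int.mul_emod, Int.emod_emod_of_dvd _ dvd_rfl, ← Int.mul_emod]

theorem mod_mod_add (a x : Int) :
    PySem.Int.mod (PySem.Int.mod a pvMOD + x) pvMOD = PySem.Int.mod (a + x) pvMOD := by
  simp only [PySem.Int.mod_eq_emod_of_pos pvMOD_pos]
  rw [Int.add_emod, Int.emod_emod_of_dvd _ dvd_rfl, ← Int.add_emod]

-- the common per-index value of the first loop
def pvVA (c : List Int) (L : Int) : Int :=
  if PySem.Int.mod L 2 = 1 then PySem.Int.powMod 2 L.toNat pvMOD
  else PySem.Int.mod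
    (PySem.Int.powMod 2 L.toNat pvMOD - PySem.List.pyGetD c (PySem.Int.floordiv L 2) 0 + pvMOD) pvMOD

-- A's first loop: the memo list never flows into BL
theorem fstA_fold (c : List Int) :
    ∀ (xs : List Int) (bl pc : List Int),
      ((xs.foldl (pvAstepBL c) (bl, pc)).1)
        = xs.foldl (fun b L => PySem.List.pySetD b L (pvVA c L)) bl := by
  intro xs
  induction xs with
  | nil => intro bl pc; rfl
  | cons x xs ih =>
    intro bl pc
    simp only [List.foldl_cons]
    unfold pvAstepBL pvVA
    split_ifs with h <;> exact ih _ _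

-- B's first loop: running power invariant
theorem B_fold_bl (c : List Int) :
    ∀ (m : Nat) (bl : List Int),
      ((PySem.List.pyRange 1 ((m : Int) + 1) 1).foldl (pvBstepBL c) (bl, 1))
        = ((PySem.List.pyRange 1 ((m : Int) + 1) 1).foldl
            (fun b L => PySem.List.pySetD b L (pvVA c L)) bl,
           PySem.Int.powMod 2 m pvMOD) := by
  intro m
  induction m with
  | zero =>
    intro bl
    rw [show ((0 : Nat) : Int) + 1 = 1 by norm_num]
    rw [PySem.List.pyRange_one_eq_nil (by norm_num)]
    simp only [List.foldl_nil]
    norm_num [PySem.Int.powMod, PySem.Int.mod_eq_emod_of_pos pvMOD_pos, pvMOD]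
  | succ m ih =>
    intro bl
    rw [show (((m + 1 : Nat)) : Int) + 1 = ((m : Int) + 1) + 1 by push_cast; ring]
    rw [PySem.List.pyRange_one_succ_right (by omega), List.foldl_append, List.foldl_append, ih]
    simp only [List.foldl_cons, List.foldl_nil]
    unfold pvBstepBL pvVA
    have ht : ((m : Int) + 1).toNat = m + 1 := by omega
    rw [pow2_step, ht]
    split_ifs with h <;> rfl

theorem getD_set_eq_ite (l : List Int) (i j : Nat) (a : Int) (h : i < l.length) :
    (l.set i a).getD j 0 = if i = j then a else l.getD j 0 := by
  simp only [List.getD_eq_getElem?_getD, List.getElem?_set, h]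
  split_ifs <;> simp_all

theorem getD_replicate_zero (n j : Nat) : (List.replicate n (0 : Int)).getD j 0 = 0 := by
  simp only [List.getD_eq_getElem?_getD, List.getElem?_replicate]
  split_ifs <;> rfl

-- true prefix sums of catalan: pvP c j = catalan[1] + … + catalan[j]
def pvP (c : List Int) : Nat → Int
  | 0 => 0
  | j + 1 => pvP c j + PySem.List.pyGetD c ((j : Int) + 1) 0

theorem pvBstepC_eq (c Cm : List Int) (m : Nat) :
    pvBstepC c Cm ((m : Int) + 1)
      = Cm.set (m + 1) (Cm.getD m 0 + PySem.List.pyGetD c ((m : Int) + 1) 0) := by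
  unfold pvBstepC
  rw [show ((m : Int) + 1) - 1 = (m : Int) by ring, PySem.List.pyGetD_natCast,
      PySem.List.pySetD_of_nonneg _ _ (show (0:Int) ≤ (m : Int) + 1 by omega),
      show ((m : Int) + 1).toNat = m + 1 from by omega]

-- B's C array after the full build
theorem C_spec (c : List Int) (n : Nat) :
    ∀ (m : Nat), m ≤ n →
      (((PySem.List.pyRange 1 ((m : Int) + 1) 1).foldl (pvBstepC c)
          (List.replicate (n + 1) 0)).length = n + 1)
      ∧ ∀ t : Nat,
          ((PySem.List.pyRange 1 ((m : Int) + 1) 1).foldl (pvBstepC c)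
            (List.replicate (n + 1) 0)).getD t 0 = if t ≤ m then pvP c t else 0 := by
  intro m
  induction m with
  | zero =>
    intro _
    rw [show ((0 : Nat) : Int) + 1 = 1 by norm_num, PySem.List.pyRange_one_eq_nil (by norm_num)]
    simp only [List.foldl_nil]
    refine ⟨List.length_replicate, ?_⟩
    intro t
    rw [getD_replicate_zero]
    rcases Nat.eq_zero_or_pos t with h | h
    · subst h; simp [pvP]
    · rw [if_neg (by omega)]
  | succ m ih =>
    intro hm
    obtain ⟨ihl, ihg⟩ := ih (by omega)
    rw [show (((m + 1 : Nat)) : Int) + 1 = ((m : Int) + 1) + 1 by push_cast; ring,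
        PySem.List.pyRange_one_succ_right (by omega), List.foldl_append]
    simp only [List.foldl_cons, List.foldl_nil]
    rw [pvBstepC_eq, ihg m, if_pos (le_refl m)]
    constructor
    · simpa [List.length_set] using ihl
    · intro t
      rw [getD_set_eq_ite _ _ _ _ (by omega), ihg t]
      split_ifs with h1 h2 h3 h4 <;> try (first | rfl | omega)
      · subst h1; rfl

-- the exact (un-modded) sum A accumulates stepwise in its inner loop
def pvInnerSum (c AL : List Int) (L : Int) (k : Nat) : Int :=
  ((List.range k).map (fun (t : Nat) =>
    PySem.List.pyGetD c (L - ((t : Int) + 1)) 0 - PySem.List.pyGetD AL ((t : Int) + 1) 0 + pvMOD)).sum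

theorem pvInnerSum_succ (c AL : List Int) (L : Int) (k : Nat) :
    pvInnerSum c AL L (k + 1)
      = pvInnerSum c AL L k
        + (PySem.List.pyGetD c (L - ((k : Int) + 1)) 0
            - PySem.List.pyGetD AL ((k : Int) + 1) 0 + pvMOD) := by
  unfold pvInnerSum
  rw [List.range_succ, List.map_append, List.sum_append]
  simp

theorem innerFold_eq (c AL : List Int) (L : Int) :
    ∀ r : Nat,
      (PySem.List.pyRange 1 ((r : Int) + 1) 1).foldl
        (fun s i => if PySem.Int.mod i 2 = 0 then
            PySem.Int.mod (s + PySem.List.pyGetD c (L - PySem.Int.floordiv i 2) 0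
              - PySem.List.pyGetD AL (PySem.Int.floordiv i 2) 0 + pvMOD) pvMOD
          else s) 0
      = PySem.Int.mod (pvInnerSum c AL L (r / 2)) pvMOD := by
  intro r
  induction r with
  | zero =>
    rw [show ((0 : Nat) : Int) + 1 = 1 by norm_num, PySem.List.pyRange_one_eq_nil (by norm_num)]
    simp [pvInnerSum, PySem.Int.mod_eq_emod_of_pos pvMOD_pos]
  | succ r ih =>
    rw [show (((r + 1 : Nat)) : Int) + 1 = ((r : Int) + 1) + 1 by push_cast; ring,
        PySem.List.pyRange_one_succ_right (by omega), List.foldl_append, ih]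
    simp only [List.foldl_cons, List.foldl_nil]
    have hfd : PySem.Int.floordiv ((r : Int) + 1) 2 = (((r + 1) / 2 : Nat) : Int) := by
      rw [PySem.Int.floordiv_eq_ediv_of_pos (by norm_num)]; omega
    have hm2 : PySem.Int.mod ((r : Int) + 1) 2 = (((r + 1) % 2 : Nat) : Int) := by
      rw [PySem.Int.mod_eq_emod_of_pos (by norm_num)]; omega
    by_cases hpar : (r + 1) % 2 = 0
    · rw [if_pos (by rw [hm2, hpar]; norm_num)]
      have hk : (r + 1) / 2 = r / 2 + 1 := by omega
      rw [hk, pvInnerSum_succ, hfd, hk]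
      rw [show (((r / 2 + 1 : Nat)) : Int) = ((r / 2 : Nat) : Int) + 1 by push_cast; ring]
      rw [show PySem.Int.mod (pvInnerSum c AL L (r / 2)) pvMOD
              + PySem.List.pyGetD c (L - (((r / 2 : Nat)) + 1)) 0
              - PySem.List.pyGetD AL (((r / 2 : Nat)) + 1) 0 + pvMOD
            = PySem.Int.mod (pvInnerSum c AL L (r / 2)) pvMOD
              + (PySem.List.pyGetD c (L - (((r / 2 : Nat)) + 1)) 0
                 - PySem.List.pyGetD AL (((r / 2 : Nat)) + 1) 0 + pvMOD) by ring]
      rw [mod_mod_add]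
    · rw [if_neg (by rw [hm2]; intro hcon; apply hpar; exact_mod_cast hcon)]
      have hk : (r + 1) / 2 = r / 2 := by omega
      rw [hk]

theorem pvAinner_eq (c AL : List Int) (m : Nat) :
    pvAinner c AL (m : Int) = PySem.Int.mod (pvInnerSum c AL (m : Int) (m / 2)) pvMOD := by
  unfold pvAinner
  exact innerFold_eq c AL (m : Int) m

-- prefix sums of a list's entries 1..t
def pvSumTo (l : List Int) (t : Nat) : Int :=
  ((List.range t).map (fun j => l.getD (j + 1) 0)).sum

theorem P_window (c : List Int) (m : Nat) :
    ∀ K : Nat, K ≤ m →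
      pvP c m - pvP c (m - K)
        = ((List.range K).map (fun (t : Nat) => PySem.List.pyGetD c ((m : Int) - (t : Int)) 0)).sum := by
  intro K
  induction K with
  | zero => simp
  | succ K ih =>
    intro hK
    rw [List.range_succ, List.map_append, List.sum_append]
    simp only [List.map_cons, List.map_nil, List.sum_cons, List.sum_nil]
    rw [← ih (by omega)]
    have h1 : m - K = (m - (K + 1)) + 1 := by omega
    have h2 : pvP c (m - K)
        = pvP c (m - (K + 1)) + PySem.List.pyGetD c (((m - (K + 1) : Nat) : Int) + 1) 0 := by
      rw [h1]; rfl
    rw [h2, show (((m - (K + 1) : Nat)) : Int) + 1 = (m : Int) - (K : Int) by omega]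
    ring

theorem getD_set_ne (l : List Int) (i j : Nat) (a : Int) (h : i ≠ j) :
    (l.set i a).getD j 0 = l.getD j 0 := by
  simp [List.getD_eq_getElem?_getD, List.getElem?_set_ne h]

theorem pvSumTo_succ (l : List Int) (t : Nat) :
    pvSumTo l (t + 1) = pvSumTo l t + l.getD (t + 1) 0 := by
  unfold pvSumTo
  rw [List.range_succ, List.map_append, List.sum_append]
  simp

theorem pvSumTo_set_lt (l : List Int) (i : Nat) (v : Int) (t : Nat) (h : t < i) :
    pvSumTo (l.set i v) t = pvSumTo l t := by
  unfold pvSumTo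
  congr 1
  apply List.map_congr_left
  intro j hj
  rw [List.mem_range] at hj
  exact getD_set_ne l i (j + 1) v (by omega)

theorem pvInnerSum_split (c A' : List Int) (m K : Nat) :
    pvInnerSum c A' ((m : Int) + 1) K
      = ((List.range K).map (fun (t : Nat) => PySem.List.pyGetD c ((m : Int) - (t : Int)) 0)).sum
        - pvSumTo A' K + (K : Int) * pvMOD := by
  induction K with
  | zero => simp [pvInnerSum, pvSumTo]
  | succ K ih =>
    rw [pvInnerSum_succ, ih, List.range_succ, List.map_append, List.sum_append, pvSumTo_succ]
    simp only [List.map_cons, List.map_nil, List.sum_cons, List.sum_nil]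
    rw [show ((m : Int) + 1) - ((K : Int) + 1) = (m : Int) - (K : Int) by ring,
        show ((K : Int) + 1) = ((K + 1 : Nat) : Int) by push_cast; ring,
        PySem.List.pyGetD_natCast]
    push_cast
    ring

-- one iteration of each AL loop in Nat form
theorem pvAstepAL_eq (c A' : List Int) (m : Nat) :
    pvAstepAL c A' ((m : Int) + 1)
      = A'.set (m + 1)
          (PySem.Int.mod (PySem.List.pyGetD c ((m : Int) + 1) 0
            - pvAinner c A' ((m : Int) + 1) + pvMOD) pvMOD) := by
  unfold pvAstepAL
  rw [PySem.List.pySetD_of_nonneg _ _ (show (0:Int) ≤ (m : Int) + 1 by omega),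
      show ((m : Int) + 1).toNat = m + 1 from by omega]

theorem pvBstepAL_eq (c Cn A' Ap : List Int) (m : Nat) :
    pvBstepAL c Cn (A', Ap) ((m : Int) + 1)
      = (A'.set (m + 1)
           (PySem.Int.mod (PySem.List.pyGetD c ((m : Int) + 1) 0
             - PySem.Int.mod (Cn.getD m 0 - Cn.getD (m - (m + 1) / 2) 0
                 - Ap.getD ((m + 1) / 2) 0) pvMOD + pvMOD) pvMOD),
         Ap.set (m + 1) (Ap.getD m 0
           + PySem.Int.mod (PySem.List.pyGetD c ((m : Int) + 1) 0
             - PySem.Int.mod (Cn.getD m 0 - Cn.getD (m - (m + 1) / 2) 0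
                 - Ap.getD ((m + 1) / 2) 0) pvMOD + pvMOD) pvMOD)) := by
  unfold pvBstepAL
  have hk : PySem.Int.floordiv ((m : Int) + 1) 2 = (((m + 1) / 2 : Nat) : Int) := by
    rw [PySem.Int.floordiv_eq_ediv_of_pos (by norm_num)]; omega
  simp only [hk]
  rw [show ((m : Int) + 1) - 1 = (m : Int) by ring,
      show (m : Int) - (((m + 1) / 2 : Nat) : Int) = ((m - (m + 1) / 2 : Nat) : Int) by omega,
      PySem.List.pyGetD_natCast, PySem.List.pyGetD_natCast, PySem.List.pyGetD_natCast,
      PySem.List.pyGetD_natCast,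
      PySem.List.pySetD_of_nonneg _ _ (show (0:Int) ≤ (m : Int) + 1 by omega),
      PySem.List.pySetD_of_nonneg _ _ (show (0:Int) ≤ (m : Int) + 1 by omega),
      show ((m : Int) + 1).toNat = m + 1 from by omega]

def pvAL0 (n : Nat) : List Int := List.replicate (n + 1) 0

def pvAfold (c : List Int) (n m : Nat) : List Int :=
  (PySem.List.pyRange 1 ((m : Int) + 1) 1).foldl (pvAstepAL c) (pvAL0 n)

-- A's stepwise-modded inner sum equals B's prefix-sum expression
theorem val_eq (c Cn A' : List Int) (n m : Nat) (hm : m + 1 ≤ n)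
    (hC : ∀ t : Nat, Cn.getD t 0 = if t ≤ n then pvP c t else 0)
    (ApK : Int) (hAp : ApK = pvSumTo A' ((m + 1) / 2)) :
    PySem.Int.mod (PySem.List.pyGetD c ((m : Int) + 1) 0
        - pvAinner c A' ((m : Int) + 1) + pvMOD) pvMOD
      = PySem.Int.mod (PySem.List.pyGetD c ((m : Int) + 1) 0
          - PySem.Int.mod (Cn.getD m 0 - Cn.getD (m - (m + 1) / 2) 0 - ApK) pvMOD
          + pvMOD) pvMOD := by
  have hinner : pvAinner c A' ((m : Int) + 1)
      = PySem.Int.mod (Cn.getD m 0 - Cn.getD (m - (m + 1) / 2) 0 - ApK) pvMOD := by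
    rw [show ((m : Int) + 1) = ((m + 1 : Nat) : Int) by push_cast; ring, pvAinner_eq,
        show ((m + 1 : Nat) : Int) = (m : Int) + 1 by push_cast; ring, pvInnerSum_split]
    rw [hC m, if_pos (by omega), hC (m - (m + 1) / 2), if_pos (by omega), hAp,
        ← P_window c m ((m + 1) / 2) (by omega)]
    simp only [PySem.Int.mod_eq_emod_of_pos pvMOD_pos]
    exact Int.add_mul_emod_self_right _ _ _
  rw [hinner]

theorem AL_inv (c : List Int) (n : Nat) (Cn : List Int)
    (hC : ∀ t : Nat, Cn.getD t 0 = if t ≤ n then pvP c t else 0) :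
    ∀ m : Nat, m ≤ n →
      ((PySem.List.pyRange 1 ((m : Int) + 1) 1).foldl (pvBstepAL c Cn) (pvAL0 n, pvAL0 n)).1
          = pvAfold c n m
      ∧ (pvAfold c n m).length = n + 1
      ∧ (∀ t : Nat, m < t → (pvAfold c n m).getD t 0 = 0)
      ∧ ((PySem.List.pyRange 1 ((m : Int) + 1) 1).foldl (pvBstepAL c Cn) (pvAL0 n, pvAL0 n)).2.length
          = n + 1
      ∧ (∀ t : Nat,
          ((PySem.List.pyRange 1 ((m : Int) + 1) 1).foldl (pvBstepAL c Cn) (pvAL0 n, pvAL0 n)).2.getD t 0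
            = if t ≤ m then pvSumTo (pvAfold c n m) t else 0) := by
  intro m
  induction m with
  | zero =>
    intro _
    rw [show ((0 : Nat) : Int) + 1 = 1 by norm_num, PySem.List.pyRange_one_eq_nil (by norm_num)]
    unfold pvAfold
    rw [show ((0 : Nat) : Int) + 1 = 1 by norm_num, PySem.List.pyRange_one_eq_nil (by norm_num)]
    simp only [List.foldl_nil]
    refine ⟨trivial, ?_, ?_, ?_, ?_⟩
    · simp [pvAL0]
    · intro t _; exact getD_replicate_zero _ _
    · simp [pvAL0]
    · intro t
      rcases Nat.eq_zero_or_pos t with h | h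
      · subst h; simp [pvAL0, pvSumTo]
      · rw [if_neg (by omega)]; exact getD_replicate_zero _ _
  | succ m ih =>
    intro hm
    obtain ⟨ih1, ih2, ih3, ih4, ih5⟩ := ih (by omega)
    rw [show (((m + 1 : Nat)) : Int) + 1 = ((m : Int) + 1) + 1 by push_cast; ring]
    have hAfold : pvAfold c n (m + 1)
        = (pvAfold c n m).set (m + 1)
            (PySem.Int.mod (PySem.List.pyGetD c ((m : Int) + 1) 0
              - pvAinner c (pvAfold c n m) ((m : Int) + 1) + pvMOD) pvMOD) := by
      unfold pvAfold
      rw [show (((m + 1 : Nat)) : Int) + 1 = ((m : Int) + 1) + 1 by push_cast; ring,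
          PySem.List.pyRange_one_succ_right (by omega), List.foldl_append]
      simp only [List.foldl_cons, List.foldl_nil]
      exact pvAstepAL_eq c _ m
    rw [PySem.List.pyRange_one_succ_right (by omega), List.foldl_append]
    simp only [List.foldl_cons, List.foldl_nil]
    set Bm := (PySem.List.pyRange 1 ((m : Int) + 1) 1).foldl (pvBstepAL c Cn) (pvAL0 n, pvAL0 n)
      with hBm
    have hpair : Bm = (Bm.1, Bm.2) := rfl
    rw [hpair, pvBstepAL_eq]
    have hApK : Bm.2.getD ((m + 1) / 2) 0 = pvSumTo (pvAfold c n m) ((m + 1) / 2) := by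
      rw [ih5, if_pos (by omega)]
    have hApm : Bm.2.getD m 0 = pvSumTo (pvAfold c n m) m := by
      rw [ih5, if_pos (by omega)]
    rw [ih1, hApK, hApm,
        ← val_eq c Cn (pvAfold c n m) n m hm hC (pvSumTo (pvAfold c n m) ((m + 1) / 2)) rfl,
        ← hAfold]
    refine ⟨rfl, ?_, ?_, ?_, ?_⟩
    · rw [hAfold, List.length_set, ih2]
    · intro t ht
      rw [hAfold, getD_set_ne _ _ _ _ (by omega), ih3 t (by omega)]
    · rw [List.length_set, ih4]
    · intro t
      by_cases ht : t = m + 1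
      · subst ht
        rw [getD_set_eq_ite _ _ _ _ (by omega), if_pos rfl, if_pos (le_refl _), hAfold,
            pvSumTo_succ, pvSumTo_set_lt _ _ _ _ (by omega),
            getD_set_eq_ite _ _ _ _ (by omega), if_pos rfl]
      · rw [getD_set_ne _ _ _ _ (by omega), ih5 t, hAfold]
        by_cases ht2 : t ≤ m
        · rw [if_pos ht2, if_pos (by omega), pvSumTo_set_lt _ _ _ _ (by omega)]
        · rw [if_neg ht2, if_neg (by omega)]

-- ===== VERDICT (by name: the statement is the Claim_ definition above) =====
theorem calculate_BL_A_L_spec : Claim_equal_calculate_BL_A_L := by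
  unfold Claim_equal_calculate_BL_A_L
  intro max_L catalan _ _
  unfold Spec_calculate_BL_A_L
  simp only [calculate_BL_A_L, calculate_BL_A_L_alt]
  by_cases h : 0 ≤ max_L
  · obtain ⟨ml, rfl⟩ : ∃ ml : Nat, max_L = (ml : Int) := ⟨max_L.toNat, (Int.toNat_of_nonneg h).symm⟩
    have hhalf : PySem.Int.floordiv (ml : Int) 2 = ((ml / 2 : Nat) : Int) := by
      rw [PySem.Int.floordiv_eq_ediv_of_pos (by norm_num)]; omega
    rw [hhalf,
        show ((ml : Int) + 1).toNat = ml + 1 from by omega,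
        show (((ml / 2 : Nat) : Int) + 1).toNat = ml / 2 + 1 from by omega]
    obtain ⟨hCl, hCg⟩ := C_spec catalan (ml / 2) (ml / 2) le_rfl
    obtain ⟨hB1, _, _, _, _⟩ := AL_inv catalan (ml / 2) _ hCg (ml / 2) le_rfl
    rw [fstA_fold, B_fold_bl]
    refine Prod.ext rfl ?_
    exact hB1.symm
  · have h1 : max_L + 1 ≤ 1 := by omega
    have h2 : PySem.Int.floordiv max_L 2 + 1 ≤ 1 := by
      rw [PySem.Int.floordiv_eq_ediv_of_pos (by norm_num)]; omega
    rw [PySem.List.pyRange_one_eq_nil h1, PySem.List.pyRange_one_eq_nil h2]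
    rfl
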